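-- pv_equiv track=rewrite | github.com/nkpcode/Python-Coding | ProblemSet1_3.py | item_order
-- ===== SOURCE A (Python) =====
-- def item_order(input_order):
--     """
--     check what the order is and return consolidated string
--     """
--     len_order = len(input_order)
--     counter = 0
--     salad_count = 0
--     hb_count = 0
--     water_count = 0
--     len_salad = len("salad")
--     len_hb = len("hamburger")
--     len_water = len("water")
--
--
--     while(counter < len_order):
--         if(((len_order - 1) - counter >= (len_salad - 1)) or
--             ((len_order - 1) - counter >= (len_hb - 1)) or
--             ((len_order - 1) - counter  >= (len_water - 1))):
--         #check if the number of characters left are greater than/equal to the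
--         #remaining characters in the input string
--
--             if (input_order[counter:(counter + len_salad)] == "salad"):
--                 salad_count = salad_count + 1
--                 counter = counter + len_salad #if this has been checked
--                 #displace the pointer by the length of the character
--
--
--             elif (input_order[counter:(counter + len_hb)] == "hamburger"):
--                 hb_count = hb_count + 1
--                 counter = counter + len_hb
--
--
--             elif (input_order[counter:(counter + len_water)] == "water"):
--                 water_count = water_count + 1
--                 counter = counter + len_water
--
--             else:
--                 counter = counter + 1
--
--
--         else:
--             counter = counter + 1
--
--
--     #print "salad:"+str(salad_count)+" hamburger:"+str(hb_count)+" water:"+str(water_count)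
--
--     return "salad:"+str(salad_count)+" hamburger:"+str(hb_count)+" water:"+str(water_count)
-- ===== SOURCE B (Python) =====
-- def item_order(input_order):
--     """
--     check what the order is and return consolidated string
--     """
--     return ("salad:" + str(input_order.count("salad"))
--             + " hamburger:" + str(input_order.count("hamburger"))
--             + " water:" + str(input_order.count("water")))
-- ===== Notes on version B (the rewrite author's own statement) =====
-- stated objective: idiomatic
-- what changed: Replaces the hand-written greedy pointer-advancing scan (one interleaved while loop with manual slice comparisons and length guards) by three independent non-overlapping str.count calls (C-level scans); equivalence rests on the fact that the three words start with distinct letters and none occurs starting strictly inside another, so greedy consumption equals independent counting.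
import Mathlib
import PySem

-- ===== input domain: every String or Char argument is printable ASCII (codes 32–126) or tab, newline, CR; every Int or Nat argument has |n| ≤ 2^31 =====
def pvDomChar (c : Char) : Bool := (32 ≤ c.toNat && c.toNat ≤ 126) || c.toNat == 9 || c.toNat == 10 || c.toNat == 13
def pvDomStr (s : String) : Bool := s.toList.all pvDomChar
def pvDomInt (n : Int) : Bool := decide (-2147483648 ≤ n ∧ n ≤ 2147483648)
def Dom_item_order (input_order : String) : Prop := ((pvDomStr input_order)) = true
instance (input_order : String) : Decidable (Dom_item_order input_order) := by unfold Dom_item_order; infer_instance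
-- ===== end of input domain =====

-- B replaces A's single interleaved greedy pointer-advancing scan by three independent
-- non-overlapping str.count calls (idiomatic); same return value on every input.

-- ===== PORT A =====
-- A's while loop advances a counter through the string; we port it as structural
-- recursion on the remaining suffix cs = input_order[counter:] (the counter only moves
-- forward, so the state is faithfully the suffix plus the three counts).
-- input_order[counter:counter+k] == "word" becomes cs.take k = "word".toList, which is
-- exact for 0 ≤ counter (Python slices clamp, as take does).
def item_order_loop : List Char → Int → Int → Int → Int × Int × Int
  | [], salad_count, hb_count, water_count => (salad_count, hb_count, water_count)
  | c :: t, salad_count, hb_count, water_count =>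
    -- len_order - 1 - counter = ((c :: t).length : Int) - 1 (remaining chars minus one)
    if ((c :: t).length : Int) - 1 ≥ (5 - 1) ∨ ((c :: t).length : Int) - 1 ≥ (9 - 1) ∨ ((c :: t).length : Int) - 1 ≥ (5 - 1) then
      if (c :: t).take 5 = "salad".toList then
        item_order_loop ((c :: t).drop 5) (salad_count + 1) hb_count water_count
      else if (c :: t).take 9 = "hamburger".toList then
        item_order_loop ((c :: t).drop 9) salad_count (hb_count + 1) water_count
      else if (c :: t).take 5 = "water".toList then
        item_order_loop ((c :: t).drop 5) salad_count hb_count (water_count + 1)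
      else
        item_order_loop t salad_count hb_count water_count
    else
      item_order_loop t salad_count hb_count water_count
  termination_by cs _ _ _ => cs.length
  decreasing_by all_goals (simp [List.length_drop]; try omega)

def item_order (input_order : String) : String :=
  let r := item_order_loop input_order.toList 0 0 0
  "salad:" ++ PySem.Int.toStr r.1 ++ " hamburger:" ++ PySem.Int.toStr r.2.1
    ++ " water:" ++ PySem.Int.toStr r.2.2

-- ===== PORT B =====
def item_order_alt (input_order : String) : String :=
  "salad:" ++ PySem.Int.toStr (PySem.Str.count input_order "salad" : Int)
    ++ " hamburger:" ++ PySem.Int.toStr (PySem.Str.count input_order "hamburger" : Int)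
    ++ " water:" ++ PySem.Int.toStr (PySem.Str.count input_order "water" : Int)

-- ===== PRECONDITION & SPEC =====
def Spec_item_order (input_order : String) (out : String) : Prop := out = item_order_alt input_order
instance (input_order : String) (out : String) : Decidable (Spec_item_order input_order out) := by unfold Spec_item_order; infer_instance

-- ===== CLAIM (what is proved, stated in full; the proofs are below) =====
def Claim_equal_item_order : Prop := ∀ (input_order : String), Dom_item_order input_order → Spec_item_order input_order (item_order input_order)

-- ===== LEMMAS AND PROOFS =====

-- Python's non-overlapping s.count(sub), as a plain greedy recursion (proof helper).
def pvCnt (sub : List Char) : List Char → Nat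
  | [] => 0
  | c :: t => if sub.isPrefixOf (c :: t) then pvCnt sub (t.drop (sub.length - 1)) + 1 else pvCnt sub t
  termination_by cs => cs.length
  decreasing_by all_goals (simp [List.length_drop]; try omega)

lemma pvCnt_go_eq (sub : List Char) (hsub : sub ≠ []) :
    ∀ fuel s acc, s.length ≤ fuel →
      PySem.Chars.count.go sub fuel s acc = acc + pvCnt sub s := by
  intro fuel
  induction fuel with
  | zero =>
    intro s acc hlen
    have : s = [] := List.eq_nil_of_length_eq_zero (Nat.le_zero.mp hlen)
    subst this
    simp [PySem.Chars.count.go, pvCnt]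
  | succ n ih =>
    intro s acc hlen
    cases s with
    | nil => simp [PySem.Chars.count.go, pvCnt]
    | cons c t =>
      rw [PySem.Chars.count.go]
      by_cases hp : sub.isPrefixOf (c :: t)
      · obtain ⟨a, as, rfl⟩ : ∃ a as, sub = a :: as := by
          cases sub with
          | nil => exact absurd rfl hsub
          | cons a as => exact ⟨a, as, rfl⟩
        have hdrop : List.drop (a :: as).length (c :: t) = t.drop as.length := by
          simp
        rw [if_pos hp, hdrop, ih _ _ (by simp at hlen ⊢; omega)]
        have : pvCnt (a :: as) (c :: t) = pvCnt (a :: as) (t.drop as.length) + 1 := by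
          rw [pvCnt, if_pos hp]; simp
        rw [this]; omega
      · rw [if_neg hp, ih _ _ (by simp at hlen; omega)]
        rw [pvCnt, if_neg hp]

lemma count_eq_pvCnt (s sub : List Char) (hsub : sub ≠ []) :
    PySem.Chars.count s sub = pvCnt sub s := by
  rw [PySem.Chars.count, if_neg (by simpa [List.isEmpty_iff] using hsub)]
  simpa using pvCnt_go_eq sub hsub s.length s 0 le_rfl

-- skipping one char that cannot start an occurrence
lemma pvCnt_cons_ne (a : Char) (as : List Char) (c : Char) (t : List Char) (h : a ≠ c) :
    pvCnt (a :: as) (c :: t) = pvCnt (a :: as) t := by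
  rw [pvCnt, if_neg]
  simp [List.isPrefixOf, h]

-- skipping a whole block none of whose chars can start an occurrence
lemma pvCnt_skip_block (a : Char) (as : List Char) (pre rest : List Char)
    (h : ∀ c ∈ pre, a ≠ c) : pvCnt (a :: as) (pre ++ rest) = pvCnt (a :: as) rest := by
  induction pre with
  | nil => rfl
  | cons c p ih =>
    rw [List.cons_append, pvCnt_cons_ne a as c _ (h c (by simp))]
    exact ih (fun d hd => h d (by simp [hd]))

-- consuming an occurrence at the front
lemma pvCnt_self_prefix (a : Char) (as rest : List Char) :
    pvCnt (a :: as) ((a :: as) ++ rest) = pvCnt (a :: as) (rest) + 1 := by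
  rw [List.cons_append, pvCnt, if_pos]
  · simp
  · exact List.isPrefixOf_iff_prefix.mpr (List.prefix_append (a :: as) rest)

-- the loop invariant: A's interleaved greedy scan counts exactly the three
-- independent non-overlapping counts of the remaining suffix
lemma item_order_loop_eq (cs : List Char) (s h w : Int) :
    item_order_loop cs s h w =
      (s + (pvCnt "salad".toList cs : Int),
       h + (pvCnt "hamburger".toList cs : Int),
       w + (pvCnt "water".toList cs : Int)) := by
  induction cs, s, h, w using item_order_loop.induct with
  | case1 s h w => simp [item_order_loop, pvCnt]
  | case2 c t s h w hg hS ih =>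
    -- salad matched and consumed
    have hcs : c :: t = "salad".toList ++ List.drop 5 (c :: t) := by
      conv_lhs => rw [← List.take_append_drop 5 (c :: t)]
      rw [hS]
    rw [item_order_loop, if_pos hg, if_pos hS, ih]
    generalize List.drop 5 (c :: t) = rest at hcs ⊢
    rw [hcs,
      show ("salad".toList : List Char) = 's' :: "alad".toList from rfl,
      show ("hamburger".toList : List Char) = 'h' :: "amburger".toList from rfl,
      show ("water".toList : List Char) = 'w' :: "ater".toList from rfl,
      pvCnt_self_prefix 's' "alad".toList rest, pvCnt_skip_block 'h' "amburger".toList ('s' :: "alad".toList) rest (by simp),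
      pvCnt_skip_block 'w' "ater".toList ('s' :: "alad".toList) rest (by simp)]
    refine Prod.ext ?_ rfl
    push_cast
    omega
  | case3 c t s h w hg hS hH ih =>
    -- hamburger matched and consumed
    have hcs : c :: t = "hamburger".toList ++ List.drop 9 (c :: t) := by
      conv_lhs => rw [← List.take_append_drop 9 (c :: t)]
      rw [hH]
    rw [item_order_loop, if_pos hg, if_neg hS, if_pos hH, ih]
    generalize List.drop 9 (c :: t) = rest at hcs ⊢
    rw [hcs,
      show ("salad".toList : List Char) = 's' :: "alad".toList from rfl,
      show ("hamburger".toList : List Char) = 'h' :: "amburger".toList from rfl,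
      show ("water".toList : List Char) = 'w' :: "ater".toList from rfl,
      pvCnt_self_prefix 'h' "amburger".toList rest, pvCnt_skip_block 's' "alad".toList ('h' :: "amburger".toList) rest (by simp),
      pvCnt_skip_block 'w' "ater".toList ('h' :: "amburger".toList) rest (by simp)]
    refine Prod.ext rfl (Prod.ext ?_ rfl)
    push_cast
    omega
  | case4 c t s h w hg hS hH hW ih =>
    -- water matched and consumed
    have hcs : c :: t = "water".toList ++ List.drop 5 (c :: t) := by
      conv_lhs => rw [← List.take_append_drop 5 (c :: t)]
      rw [hW]
    rw [item_order_loop, if_pos hg, if_neg hS, if_neg hH, if_pos hW, ih]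
    generalize List.drop 5 (c :: t) = rest at hcs ⊢
    rw [hcs,
      show ("salad".toList : List Char) = 's' :: "alad".toList from rfl,
      show ("hamburger".toList : List Char) = 'h' :: "amburger".toList from rfl,
      show ("water".toList : List Char) = 'w' :: "ater".toList from rfl,
      pvCnt_self_prefix 'w' "ater".toList rest, pvCnt_skip_block 's' "alad".toList ('w' :: "ater".toList) rest (by simp),
      pvCnt_skip_block 'h' "amburger".toList ('w' :: "ater".toList) rest (by simp)]
    refine Prod.ext rfl (Prod.ext rfl ?_)
    push_cast
    omega
  | case5 c t s h w hg hS hH hW ih =>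
    -- no word starts here: advance one char; none of the counts sees an occurrence at 0
    rw [item_order_loop, if_pos hg, if_neg hS, if_neg hH, if_neg hW, ih]
    have hs : pvCnt "salad".toList (c :: t) = pvCnt "salad".toList t := by
      rw [pvCnt, if_neg]
      intro hp
      exact hS ((List.prefix_iff_eq_take.mp (List.isPrefixOf_iff_prefix.mp hp)).symm)
    have hh : pvCnt "hamburger".toList (c :: t) = pvCnt "hamburger".toList t := by
      rw [pvCnt, if_neg]
      intro hp
      exact hH ((List.prefix_iff_eq_take.mp (List.isPrefixOf_iff_prefix.mp hp)).symm)
    have hw : pvCnt "water".toList (c :: t) = pvCnt "water".toList t := by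
      rw [pvCnt, if_neg]
      intro hp
      exact hW ((List.prefix_iff_eq_take.mp (List.isPrefixOf_iff_prefix.mp hp)).symm)
    rw [hs, hh, hw]
  | case6 c t s h w hg ih =>
    -- fewer than 5 chars remain: no word can match, A just advances
    have hlen : (c :: t).length < 5 := by
      simp only [not_or, not_le] at hg
      have := hg.1
      simp only [List.length_cons] at this ⊢
      omega
    rw [item_order_loop, if_neg hg, ih]
    have skip : ∀ sub : List Char, 5 ≤ sub.length →
        pvCnt sub (c :: t) = pvCnt sub t := by
      intro sub hsub
      rw [pvCnt, if_neg]
      intro hp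
      have := (List.isPrefixOf_iff_prefix.mp hp).length_le
      omega
    rw [skip _ (by simp), skip _ (by simp), skip _ (by simp)]

-- ===== VERDICT (by name: the statement is the Claim_ definition above) =====
theorem item_order_spec : Claim_equal_item_order := by
  intro input_order _
  unfold Spec_item_order item_order item_order_alt
  rw [item_order_loop_eq]
  simp only [PySem.Str.count]
  rw [count_eq_pvCnt _ _ (by decide), count_eq_pvCnt _ _ (by decide),
    count_eq_pvCnt _ _ (by decide)]
  simp
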